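-- pv_equiv track=rewrite | github.com/SobinYim/Algorithm | [Programmers] Lv2/택배상자.py | solution
-- ===== SOURCE A (Python) =====
-- def solution(order): #택배 기사님이 원하는 상자 순서
--     container = 0 #보조 컨테이너 상자 수
--     for idx, i in enumerate(order):
--         if container < (tmp := i - idx):
--             container = tmp
--         elif i < container:
--             return idx
--         container -= 1
--     return len(order)
-- ===== SOURCE B (Python) =====
-- def solution(order):
--     # Stage 1: materialize the list of prefix maxima of the values.
--     pmax = []
--     m = 0
--     for i in order:
--         if i > m:
--             m = i
--         pmax.append(m)
--     # Stage 2: first index where the box cannot be served, i.e. order[idx] + idx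
--     # falls below the prefix maximum; otherwise every box is served.
--     for idx in range(len(order)):
--         if order[idx] + idx < pmax[idx]:
--             return idx
--     return len(order)
-- ===== Notes on version B (the rewrite author's own statement) =====
-- stated objective: alternative
-- what changed: Replaces A's single fused pass with a decremented auxiliary-container counter and mid-loop early return by two staged passes: first materialize the prefix-maximum list of the values, then search it for the first index where order[idx]+idx drops below that prefix maximum.
import Mathlib
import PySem

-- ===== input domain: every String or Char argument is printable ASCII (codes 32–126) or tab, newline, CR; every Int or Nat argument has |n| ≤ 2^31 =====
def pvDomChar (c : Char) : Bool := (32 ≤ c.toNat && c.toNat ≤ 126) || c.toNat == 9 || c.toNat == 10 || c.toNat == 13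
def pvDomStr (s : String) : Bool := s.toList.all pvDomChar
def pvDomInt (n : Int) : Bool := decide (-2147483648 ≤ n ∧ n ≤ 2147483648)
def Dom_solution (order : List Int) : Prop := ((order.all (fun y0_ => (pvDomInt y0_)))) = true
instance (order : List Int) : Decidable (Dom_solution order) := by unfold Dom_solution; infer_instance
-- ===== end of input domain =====

-- B replaces A's fused counter loop by two staged passes (alternative decomposition): build the prefix-maximum list, then search it for the first failing index.


-- ===== PORT A =====
-- loop over enumerate(order) with early return; 'idx' is the current index,
-- 'container' the auxiliary counter; on exhaustion idx = len(order).
def solutionLoopA (order : List Int) (idx : Int) (container : Int) : Int :=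
  match order with
  | [] => idx
  | i :: rest =>
    if container < i - idx then solutionLoopA rest (idx + 1) (i - idx - 1)
    else if i < container then idx
    else solutionLoopA rest (idx + 1) (container - 1)

def solution (order : List Int) : Int := solutionLoopA order 0 0

-- ===== PORT B =====
-- Stage 1 of Source B: build the prefix-maximum list (m starts at 0).
def buildPmax (order : List Int) (m : Int) : List Int :=
  match order with
  | [] => []
  | i :: rest =>
    let m' := if i > m then i else m
    m' :: buildPmax rest m'

-- Stage 2 of Source B: scan order and pmax in step (Source B indexes both by idx);
-- first idx with order[idx] + idx < pmax[idx], else len(order) (= idx at exhaustion).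
def findFail (order pmax : List Int) (idx : Int) : Int :=
  match order, pmax with
  | i :: ro, m :: rp => if i + idx < m then idx else findFail ro rp (idx + 1)
  | _, _ => idx

def solution_alt (order : List Int) : Int := findFail order (buildPmax order 0) 0

-- ===== PRECONDITION & SPEC =====
def Spec_solution (order : List Int) (out : Int) : Prop := out = solution_alt order
instance (order : List Int) (out : Int) : Decidable (Spec_solution order out) := by unfold Spec_solution; infer_instance

-- ===== CLAIM (what is proved, stated in full; the proofs are below) =====
def Claim_equal_solution : Prop := ∀ (order : List Int), Dom_solution order → Spec_solution order (solution order)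

-- ===== LEMMAS AND PROOFS =====
-- Invariant: A's container equals the running maximum minus the current index,
-- and B's staged search over buildPmax consumes the same running maximum.
theorem loopA_eq_findFail (order : List Int) : ∀ (idx m : Int), 0 ≤ idx →
    solutionLoopA order idx (m - idx) = findFail order (buildPmax order m) idx := by
  induction order with
  | nil => intro idx m _; rfl
  | cons i rest ih =>
    intro idx m hidx
    simp only [solutionLoopA, buildPmax, findFail]
    by_cases h1 : i > m
    · rw [if_pos h1, if_pos (by omega : m - idx < i - idx),
        if_neg (by omega : ¬ i + idx < i)]
      have : i - idx - 1 = i - (idx + 1) := by ring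
      rw [this, ih _ _ (by omega)]
    · rw [if_neg h1, if_neg (by omega : ¬ m - idx < i - idx)]
      by_cases h2 : i + idx < m
      · rw [if_pos (by omega : i < m - idx), if_pos h2]
      · rw [if_neg (by omega : ¬ i < m - idx), if_neg h2]
        have : m - idx - 1 = m - (idx + 1) := by ring
        rw [this, ih _ _ (by omega)]

-- ===== VERDICT (by name: the statement is the Claim_ definition above) =====
theorem solution_spec : Claim_equal_solution := by
  intro order _
  unfold Spec_solution solution solution_alt
  simpa using loopA_eq_findFail order 0 0 le_rfl
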